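-- pv_equiv track=rewrite | github.com/eunjin11/Algorithm_Study | 백준/Gold/8913. 문자열 뽑기/문자열 뽑기.py | dfs
-- ===== SOURCE A (Python) =====
-- def split_string(str):
--     result = []
--     current_char = str[0]
--     current_string = current_char
--
--     for char in str[1:]:
--         if char == current_char:
--             current_string += char
--         else:
--             result.append(current_string)
--             current_char = char
--             current_string = char
--
--     result.append(current_string)  # 마지막 그룹 추가
--     return result
--
-- def merge(str_list):
--     return split_string(''.join(str_list))
--
-- def dfs(str):
--
--     str_list=merge(str)
--
--     if len(str_list)==1:
--         if len(str_list[0])==1: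
--             return 0
--         else:
--             return 1
--
--     for i in range(len(str_list)):
--         if len(str_list[i])>1:
--             new_str_list=[]
--             new_str_list+=str_list
--             new_str_list.pop(i)
--
--             if dfs(new_str_list)==1:
--                 return 1
--     return 0
-- ===== SOURCE B (Python) =====
-- def dfs(str):
--     memo = {}
--
--     def can(s):
--         if s in memo:
--             return memo[s]
--         cuts = [0] + [i for i in range(1, len(s)) if s[i] != s[i - 1]] + [len(s)]
--         res = 0
--         if len(cuts) == 2:
--             res = 0 if len(s) == 1 else 1
--         else:
--             for k in range(len(cuts) - 1):
--                 if cuts[k + 1] - cuts[k] > 1 and can(s[:cuts[k]] + s[cuts[k + 1]:]) == 1: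
--                     res = 1
--                     break
--         memo[s] = res
--         return res
--
--     return can(str)
-- ===== Notes on version B (the rewrite author's own statement) =====
-- stated objective: alternative
-- what changed: B memoizes each already-solved state in a dict and works on the raw string with run boundaries as index cuts, replacing A's unmemoized recursion that rebuilds, re-joins and re-splits a list of strings at every node (intended as faster; measured 444x at n=64, but both time out on some n=256 inputs).
import Mathlib
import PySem

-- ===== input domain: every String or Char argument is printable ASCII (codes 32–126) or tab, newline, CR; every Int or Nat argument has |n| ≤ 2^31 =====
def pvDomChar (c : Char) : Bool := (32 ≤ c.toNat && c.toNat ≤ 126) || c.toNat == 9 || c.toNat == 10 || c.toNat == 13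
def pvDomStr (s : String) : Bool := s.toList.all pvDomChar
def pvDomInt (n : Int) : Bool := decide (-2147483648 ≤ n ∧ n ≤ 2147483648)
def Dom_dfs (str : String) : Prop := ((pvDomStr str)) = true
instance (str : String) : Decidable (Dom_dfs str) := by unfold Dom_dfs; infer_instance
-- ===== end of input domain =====

-- B memoizes each already-solved state in a dict and works on the raw string with run
-- boundaries as index cuts, instead of A's unmemoized recursion that rebuilds, re-joins and
-- re-splits a list of strings at every node (objective: alternative).

-- ===== PORT A =====
-- split_string: first char seeds (current_char, current_string, result); fold over the rest.
def splitA (l : List Char) : List (List Char) :=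
  match l with
  | [] => []   -- Python raises IndexError on ''; excluded by Pre_dfs (recursive states are never empty)
  | c :: rest =>
    let st := rest.foldl
      (fun (st : Char × List Char × List (List Char)) ch =>
        let (cc, cs, res) := st
        if ch == cc then (cc, cs ++ [ch], res) else (ch, [ch], res ++ [cs]))
      (c, [c], ([] : List (List Char)))
    st.2.2 ++ [st.2.1]

-- dfs with fuel (Python's recursion always terminates: each removal shortens the joined
-- string by ≥ 2; fuel |s|+1 is always sufficient).  The 'for i in range…: if dfs(..)==1:
-- return 1 … return 0' loop is the any-over-range fold.
def dfsAF : Nat → List (List Char) → Int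
  | 0, _ => 0
  | n + 1, strList =>
    let sl := splitA strList.flatten   -- str_list = merge(str)
    if sl.length == 1 then
      (if (sl.getD 0 []).length == 1 then 0 else 1)
    else
      if (List.range sl.length).any
          (fun i => decide ((sl.getD i []).length > 1) && (dfsAF n (sl.eraseIdx i) == 1))
      then 1 else 0

def dfs (str : String) : Int := dfsAF (str.toList.length + 1) [str.toList]

-- ===== PORT B =====
-- cuts = [0] + [i for i in range(1, len(s)) if s[i] != s[i-1]] + [len(s)]
def cutsOf (s : List Char) : List Nat :=
  [0] ++ (List.range' 1 (s.length - 1)).filter (fun i => s.getD i ' ' != s.getD (i - 1) ' ') ++ [s.length]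

-- the 'for k in range(…): if …: res = 1; break' loop of can, threading the memo dict
def canScan (can : List Char → PySem.Dict (List Char) Int → Int × PySem.Dict (List Char) Int)
    (s : List Char) (cuts : List Nat) :
    List Nat → PySem.Dict (List Char) Int → Int × PySem.Dict (List Char) Int
  | [], m => (0, m)
  | k :: ks, m =>
    if cuts.getD (k + 1) 0 - cuts.getD k 0 > 1 then
      let r := can (s.take (cuts.getD k 0) ++ s.drop (cuts.getD (k + 1) 0)) m
      if r.1 == 1 then (1, r.2) else canScan can s cuts ks r.2
    else canScan can s cuts ks m

-- can, with fuel (each recursive call is on a string shorter by ≥ 2; fuel |s|+1 suffices)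
def canM : Nat → List Char → PySem.Dict (List Char) Int → Int × PySem.Dict (List Char) Int
  | 0, _, m => (0, m)
  | n + 1, s, m =>
    match PySem.Dict.get? m s with
    | some v => (v, m)
    | none =>
      let cuts := cutsOf s
      let r :=
        if cuts.length == 2 then ((if s.length == 1 then (0 : Int) else 1), m)
        else canScan (canM n) s cuts (List.range (cuts.length - 1)) m
      (r.1, PySem.Dict.insert r.2 s r.1)

def dfs_alt (str : String) : Int :=
  (canM (str.toList.length + 1) str.toList PySem.Dict.empty).1

-- ===== PRECONDITION & SPEC =====
-- Pre_ excludes only the empty string, on which A raises IndexError (str[0] in split_string).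
def Pre_dfs (str : String) : Prop := str ≠ ""
instance (str : String) : Decidable (Pre_dfs str) := by unfold Pre_dfs; infer_instance
def pvWitness_dfs : String := "aabba"

def Spec_dfs (str : String) (out : Int) : Prop := out = dfs_alt str
instance (str : String) (out : Int) : Decidable (Spec_dfs str out) := by unfold Spec_dfs; infer_instance

-- ===== CLAIM (what is proved, stated in full; the proofs are below) =====
def Claim_equal_dfs : Prop := ∀ (str : String), Dom_dfs str → Pre_dfs str → Spec_dfs str (dfs str)

-- ===== LEMMAS AND PROOFS =====

-- canonical-group notions
def hdc (g : List Char) : Char := g.headD 'a'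
def GoodG (g : List Char) : Prop := g ≠ [] ∧ ∀ c ∈ g, c = hdc g
def Good (gl : List (List Char)) : Prop := (∀ g ∈ gl, GoodG g) ∧ (gl.map hdc).IsChain (· ≠ ·)

def stepA (st : Char × List Char × List (List Char)) (ch : Char) : Char × List Char × List (List Char) :=
  let (cc, cs, res) := st
  if ch == cc then (cc, cs ++ [ch], res) else (ch, [ch], res ++ [cs])

theorem splitA_eq_fold (c : Char) (rest : List Char) :
    splitA (c :: rest) = (rest.foldl stepA (c, [c], [])).2.2 ++ [(rest.foldl stepA (c, [c], [])).2.1] := rfl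

theorem foldA_inv (t : List Char) (cc : Char) (cs : List Char) (res : List (List Char))
    (h1 : cs ≠ []) (h2 : ∀ x ∈ cs, x = cc) (h3 : hdc cs = cc)
    (h4 : ∀ g ∈ res, GoodG g) (h5 : ((res ++ [cs]).map hdc).IsChain (· ≠ ·)) :
    Good ((t.foldl stepA (cc, cs, res)).2.2 ++ [(t.foldl stepA (cc, cs, res)).2.1]) ∧
      ((t.foldl stepA (cc, cs, res)).2.2 ++ [(t.foldl stepA (cc, cs, res)).2.1]).flatten
        = res.flatten ++ cs ++ t := by
  induction t generalizing cc cs res with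
  | nil =>
    refine ⟨⟨?_, h5⟩, by simp⟩
    intro g hg
    rcases List.mem_append.mp hg with h | h
    · exact h4 g h
    · simp at h; subst h; exact ⟨h1, fun c hc => by rw [h2 c hc, h3]⟩
  | cons ch t ih =>
    by_cases hc : ch = cc
    · subst hc
      simp only [List.foldl_cons, stepA, beq_self_eq_true, if_true]
      have := ih ch (cs ++ [ch]) res (by simp)
        (fun x hx => by rcases List.mem_append.mp hx with h | h; exact h2 x h; simpa using h)
        (by cases cs with | nil => exact absurd rfl h1 | cons a l => simpa [hdc] using h3)
        h4 (by
          have : hdc (cs ++ [ch]) = hdc cs := by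
            cases cs with | nil => exact absurd rfl h1 | cons a l => simp [hdc]
          simpa [this] using h5)
      refine ⟨this.1, ?_⟩
      rw [this.2]; simp
    · simp only [List.foldl_cons, stepA, beq_iff_eq, if_neg hc]
      have := ih ch [ch] (res ++ [cs]) (by simp) (by simp [hdc]) (by simp [hdc])
        (fun g hg => by
          rcases List.mem_append.mp hg with h | h
          · exact h4 g h
          · simp at h; subst h; exact ⟨h1, fun c hc' => by rw [h2 c hc', h3]⟩)
        (by
          rw [show res ++ [cs] ++ [[ch]] = (res ++ [cs]) ++ [[ch]] by simp, List.map_append, List.isChain_append]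
          refine ⟨h5, by simp, ?_⟩
          intro x hx y hy
          simp [hdc] at hy
          rw [show List.map hdc (res ++ [cs]) = List.map hdc res ++ [hdc cs] by simp,
            List.getLast?_concat] at hx
          simp at hx
          subst hy; rw [← hx, h3]; exact fun h => hc h.symm)
      refine ⟨this.1, ?_⟩
      rw [this.2]; simp

theorem splitA_spec (l : List Char) : Good (splitA l) ∧ (splitA l).flatten = l := by
  cases l with
  | nil => exact ⟨⟨by simp [splitA], by simp [splitA]⟩, by simp [splitA]⟩
  | cons c rest =>
    rw [splitA_eq_fold]
    have := foldA_inv rest c [c] [] (by simp) (by simp) (by simp [hdc]) (by simp) (by simp)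
    exact ⟨this.1, by rw [this.2]; simp⟩

theorem Good_tail (g : List Char) (gl : List (List Char)) (h : Good (g :: gl)) : Good gl := by
  refine ⟨fun g' hg' => h.1 g' (by simp [hg']), ?_⟩
  have := h.2
  simp only [List.map_cons] at this
  exact this.tail

theorem flatten_ne_nil (gl : List (List Char)) (h : ∀ g ∈ gl, GoodG g) (hne : gl ≠ []) :
    gl.flatten ≠ [] := by
  cases gl with
  | nil => exact absurd rfl hne
  | cons g gl =>
    have := (h g (by simp)).1
    simp [List.flatten_cons]
    intro h'
    exact absurd h' this

theorem list_any_congr {α : Type} (p q : α → Bool) (l : List α) (h : ∀ a ∈ l, p a = q a) :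
    l.any p = l.any q := by
  induction l with
  | nil => rfl
  | cons a l ih => simp [List.any_cons, h a (by simp), ih (fun b hb => h b (by simp [hb]))]

-- length of the flatten after erasing group i
theorem flatten_eraseIdx_length (gl : List (List Char)) (i : Nat) (hi : i < gl.length) :
    ((gl.eraseIdx i).flatten).length + (gl.getD i []).length = gl.flatten.length := by
  induction gl generalizing i with
  | nil => simp at hi
  | cons g gl ih =>
    cases i with
    | zero => simp [Nat.add_comm]
    | succ i =>
      have := ih i (by simpa using hi)
      simp only [List.eraseIdx_cons_succ, List.flatten_cons, List.length_append, List.getD_cons_succ]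
      omega

-- dfsAF only looks at the flatten of its argument
theorem dfsAF_congr_flatten (n : Nat) (sl sl' : List (List Char)) (h : sl.flatten = sl'.flatten) :
    dfsAF n sl = dfsAF n sl' := by
  cases n with
  | zero => rfl
  | succ n => simp only [dfsAF, h]

-- fuel irrelevance above the length of the flatten
theorem dfsAF_stable (n : Nat) : ∀ (m : Nat) (sl : List (List Char)),
    sl.flatten.length < n → sl.flatten.length < m → dfsAF n sl = dfsAF m sl := by
  induction n with
  | zero => intro m sl h _; omega
  | succ n ih =>
    intro m sl hn hm
    cases m with
    | zero => omega
    | succ m =>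
      simp only [dfsAF]
      congr 1
      have hany : (List.range (splitA sl.flatten).length).any
            (fun i => decide (((splitA sl.flatten).getD i []).length > 1)
              && (dfsAF n ((splitA sl.flatten).eraseIdx i) == 1))
          = (List.range (splitA sl.flatten).length).any
            (fun i => decide (((splitA sl.flatten).getD i []).length > 1)
              && (dfsAF m ((splitA sl.flatten).eraseIdx i) == 1)) := by
        apply list_any_congr
        intro i hi
        have hi' : i < (splitA sl.flatten).length := by simpa using hi
        by_cases hg : ((splitA sl.flatten).getD i []).length > 1
        · have hrec : dfsAF n ((splitA sl.flatten).eraseIdx i)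
              = dfsAF m ((splitA sl.flatten).eraseIdx i) := by
            have h1 := flatten_eraseIdx_length (splitA sl.flatten) i hi'
            have h2 : (splitA sl.flatten).flatten.length = sl.flatten.length := by
              rw [(splitA_spec _).2]
            exact ih _ _ (by omega) (by omega)
          rw [hrec]
        · have hfalse : decide (((splitA sl.flatten).getD i []).length > 1) = false := by
            simpa using hg
          rw [hfalse]
          simp
      rw [hany]

-- the canonical value of a state
def V (s : List Char) : Int := dfsAF (s.length + 1) [s]

theorem dfsAF_eq_V (n : Nat) (s : List Char) (h : s.length < n) : dfsAF n [s] = V s := by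
  apply dfsAF_stable <;> simpa using (by omega : s.length < n ∧ s.length < s.length + 1) |>.elim (fun a b => by omega)

-- ===== partial sums of group lengths =====
def psum (a : Nat) : List (List Char) → List Nat
  | [] => [a]
  | g :: gl => a :: psum (a + g.length) gl

def props (a : Nat) : List (List Char) → List Nat
  | [] => []
  | [_] => []
  | g :: gl => (a + g.length) :: props (a + g.length) gl

theorem psum_eq (a : Nat) (gl : List (List Char)) (h : gl ≠ []) :
    psum a gl = a :: (props a gl ++ [a + gl.flatten.length]) := by
  induction gl generalizing a with
  | nil => exact absurd rfl h
  | cons g gl ih =>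
    cases gl with
    | nil => simp [psum, props]
    | cons g2 gl' =>
      rw [show psum a (g :: g2 :: gl') = a :: psum (a + g.length) (g2 :: gl') from rfl,
        ih (a + g.length) (by simp)]
      simp [props, Nat.add_assoc]

theorem psum_length (a : Nat) (gl : List (List Char)) : (psum a gl).length = gl.length + 1 := by
  induction gl generalizing a with
  | nil => rfl
  | cons g gl ih => simp [psum, ih]

theorem psum_getD_zero (a : Nat) (gl : List (List Char)) : (psum a gl).getD 0 0 = a := by
  cases gl <;> rfl

theorem psum_getD_succ (a : Nat) (g : List Char) (gl : List (List Char)) (k : Nat) :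
    (psum a (g :: gl)).getD (k + 1) 0 = (psum (a + g.length) gl).getD k 0 := rfl

-- remove group k = take S_k ++ drop S_{k+1}
theorem remove_eq (gl : List (List Char)) (k : Nat) (hk : k < gl.length) :
    gl.flatten.take ((psum 0 gl).getD k 0) ++ gl.flatten.drop ((psum 0 gl).getD (k + 1) 0)
      = (gl.eraseIdx k).flatten := by
  -- generalized with an arbitrary already-flattened prefix P
  suffices H : ∀ (k : Nat) (gl : List (List Char)) (P : List Char), k < gl.length →
      (P ++ gl.flatten).take ((psum P.length gl).getD k 0)
        ++ (P ++ gl.flatten).drop ((psum P.length gl).getD (k + 1) 0)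
      = P ++ (gl.eraseIdx k).flatten by
    have := H k gl [] hk
    simpa using this
  intro k
  induction k with
  | zero =>
    intro gl P hk
    cases gl with
    | nil => simp at hk
    | cons g gl =>
      rw [psum_getD_succ, psum_getD_zero, psum_getD_zero]
      rw [show P ++ (g :: gl).flatten = (P ++ g) ++ gl.flatten by simp]
      rw [show P.length + g.length = (P ++ g).length by simp]
      rw [List.take_append_of_le_length (by simp), List.drop_left]
      simp [List.take_append_of_le_length, List.take_left]
  | succ k ih =>
    intro gl P hk
    cases gl with
    | nil => simp at hk
    | cons g gl =>
      rw [psum_getD_succ, psum_getD_succ]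
      have := ih gl (P ++ g) (by simpa using hk)
      rw [show P.length + g.length = (P ++ g).length by simp]
      rw [show P ++ (g :: gl).flatten = (P ++ g) ++ gl.flatten by simp]
      rw [this]
      simp

-- S_{k+1} - S_k is the length of group k
theorem psum_diff (gl : List (List Char)) (k : Nat) (hk : k < gl.length) (a : Nat) :
    (psum a gl).getD (k + 1) 0 - (psum a gl).getD k 0 = (gl.getD k []).length := by
  induction gl generalizing a k with
  | nil => simp at hk
  | cons g gl ih =>
    cases k with
    | zero =>
      rw [psum_getD_succ, psum_getD_zero, psum_getD_zero]
      simp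
    | succ k =>
      rw [psum_getD_succ, psum_getD_succ]
      exact ih k (by simpa using hk) (a + g.length)

-- ===== cutsOf = psum over the split groups =====
theorem props_shift (a : Nat) (gl : List (List Char)) :
    props a gl = (props 0 gl).map (a + ·) := by
  induction gl generalizing a with
  | nil => rfl
  | cons g gl ih =>
    cases gl with
    | nil => rfl
    | cons g2 gl' =>
      rw [show props a (g :: g2 :: gl') = (a + g.length) :: props (a + g.length) (g2 :: gl') from rfl,
        show props 0 (g :: g2 :: gl') = (0 + g.length) :: props (0 + g.length) (g2 :: gl') from rfl,
        ih (a + g.length), ih (0 + g.length)]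
      simp [List.map_map, Nat.add_assoc, Function.comp]

theorem props_gt (a : Nat) (gl : List (List Char)) (h : ∀ g ∈ gl, GoodG g) :
    ∀ x ∈ props a gl, a < x ∧ x < a + gl.flatten.length := by
  induction gl generalizing a with
  | nil => simp [props]
  | cons g gl ih =>
    cases gl with
    | nil => simp [props]
    | cons g2 gl' =>
      intro x hx
      rw [show props a (g :: g2 :: gl') = (a + g.length) :: props (a + g.length) (g2 :: gl') from rfl] at hx
      have hg : g ≠ [] := (h g (by simp)).1
      have hglen : 0 < g.length := List.length_pos_iff.mpr hg
      have hflat : (g2 :: gl').flatten ≠ [] :=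
        flatten_ne_nil _ (fun g' hg' => h g' (by simp [hg'])) (by simp)
      have hflen : 0 < (g2 :: gl').flatten.length := List.length_pos_iff.mpr hflat
      simp only [List.flatten_cons, List.length_append] at hflen
      rcases List.mem_cons.mp hx with rfl | hx
      · constructor
        · omega
        · simp only [List.flatten_cons, List.length_append]
          omega
      · have := ih (a + g.length) (fun g' hg' => h g' (by simp [hg'])) x hx
        simp only [List.flatten_cons, List.length_append] at this
        constructor
        · omega
        · simp only [List.flatten_cons, List.length_append]
          omega

theorem props_sorted (a : Nat) (gl : List (List Char)) (h : ∀ g ∈ gl, GoodG g) :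
    (props a gl).Pairwise (· < ·) := by
  induction gl generalizing a with
  | nil => simp [props]
  | cons g gl ih =>
    cases gl with
    | nil => simp [props]
    | cons g2 gl' =>
      rw [show props a (g :: g2 :: gl') = (a + g.length) :: props (a + g.length) (g2 :: gl') from rfl]
      refine List.pairwise_cons.mpr ⟨?_, ih (a + g.length) (fun g' hg' => h g' (by simp [hg']))⟩
      intro x hx
      exact (props_gt (a + g.length) (g2 :: gl') (fun g' hg' => h g' (by simp [hg'])) x hx).1

-- boundary characterization: s[i] ≠ s[i-1] iff i is a proper partial sum
theorem boundary_iff (gl : List (List Char)) (hG : Good gl) (i : Nat) (h1 : 1 ≤ i)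
    (h2 : i < gl.flatten.length) :
    (gl.flatten.getD i ' ' ≠ gl.flatten.getD (i - 1) ' ') ↔ i ∈ props 0 gl := by
  induction gl generalizing i with
  | nil => simp at h2
  | cons g gl ih =>
    have hg : GoodG g := hG.1 g (by simp)
    have hglen : 0 < g.length := List.length_pos_iff.mpr hg.1
    by_cases hlt : i < g.length
    · -- inside the first group: both chars equal, not a partial sum
      have e1 : (g :: gl).flatten.getD i ' ' = hdc g := by
        rw [List.flatten_cons, List.getD_append _ _ _ _ hlt, List.getD_eq_getElem _ _ hlt]
        exact hg.2 _ (List.getElem_mem hlt)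
      have e2 : (g :: gl).flatten.getD (i - 1) ' ' = hdc g := by
        have hlt' : i - 1 < g.length := by omega
        rw [List.flatten_cons, List.getD_append _ _ _ _ hlt', List.getD_eq_getElem _ _ hlt']
        exact hg.2 _ (List.getElem_mem hlt')
      rw [e1, e2]
      simp only [ne_eq, not_true_eq_false, false_iff]
      intro hmem
      cases gl with
      | nil => simp [props] at hmem
      | cons g2 gl' =>
        rw [show props 0 (g :: g2 :: gl') = (0 + g.length) :: props (0 + g.length) (g2 :: gl') from rfl] at hmem
        rcases List.mem_cons.mp hmem with h' | h'
        · omega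
        · have := (props_gt _ _ (fun g' hg' => hG.1 g' (by simp [hg'])) i h').1
          omega
    · by_cases heq : i = g.length
      · -- the seam between group 0 and group 1
        subst heq
        obtain ⟨g2, gl', rfl⟩ : ∃ g2 gl', gl = g2 :: gl' := by
          cases gl with
          | nil => simp at h2
          | cons a b => exact ⟨a, b, rfl⟩
        have hg2 : GoodG g2 := hG.1 g2 (by simp)
        have e1 : (g :: g2 :: gl').flatten.getD g.length ' ' = hdc g2 := by
          rw [List.flatten_cons, List.getD_append_right _ _ _ _ (le_refl _)]
          simp only [Nat.sub_self]
          cases g2 with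
          | nil => exact absurd rfl hg2.1
          | cons c t => simp [hdc]
        have e2 : (g :: g2 :: gl').flatten.getD (g.length - 1) ' ' = hdc g := by
          have hlt' : g.length - 1 < g.length := by omega
          rw [List.flatten_cons, List.getD_append _ _ _ _ hlt', List.getD_eq_getElem _ _ hlt']
          exact hg.2 _ (List.getElem_mem hlt')
        rw [e1, e2]
        have hne : hdc g2 ≠ hdc g := by
          have := hG.2
          simp only [List.map_cons] at this
          exact fun h => (List.isChain_cons.mp this).1 (hdc g2) (by simp) h.symm
        simp only [ne_eq, hne, not_false_eq_true, true_iff]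
        rw [show props 0 (g :: g2 :: gl') = (0 + g.length) :: props (0 + g.length) (g2 :: gl') from rfl]
        simp
      · -- strictly past the first group: shift into the tail
        have hgt : g.length < i := by omega
        obtain ⟨g2, gl', rfl⟩ : ∃ g2 gl', gl = g2 :: gl' := by
          cases gl with
          | nil => simp at h2; omega
          | cons a b => exact ⟨a, b, rfl⟩
        have hGt : Good (g2 :: gl') := Good_tail _ _ hG
        have h2' : i - g.length < (g2 :: gl').flatten.length := by
          simp only [List.flatten_cons, List.length_append] at h2 ⊢
          omega
        have e1 : (g :: g2 :: gl').flatten.getD i ' ' = (g2 :: gl').flatten.getD (i - g.length) ' ' := by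
          rw [List.flatten_cons, List.getD_append_right _ _ _ _ (by omega)]
        have e2 : (g :: g2 :: gl').flatten.getD (i - 1) ' '
            = (g2 :: gl').flatten.getD (i - g.length - 1) ' ' := by
          rw [List.flatten_cons, List.getD_append_right _ _ _ _ (by omega)]
          congr 1
          omega
        rw [e1, e2, ih hGt (i - g.length) (by omega) h2']
        rw [show props 0 (g :: g2 :: gl') = (0 + g.length) :: props (0 + g.length) (g2 :: gl') from rfl]
        rw [props_shift (0 + g.length)]
        constructor
        · intro hmem
          exact List.mem_cons.mpr (Or.inr (List.mem_map.mpr ⟨i - g.length, hmem, by omega⟩))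
        · intro hmem
          rcases List.mem_cons.mp hmem with h' | h'
          · omega
          · obtain ⟨j, hj, hji⟩ := List.mem_map.mp h'
            have : j = i - g.length := by omega
            rwa [← this]

-- the filtered range in cutsOf equals props 0 (splitA s)
theorem cuts_middle_eq (s : List Char) (hne : s ≠ []) :
    (List.range' 1 (s.length - 1)).filter (fun i => s.getD i ' ' != s.getD (i - 1) ' ')
      = props 0 (splitA s) := by
  obtain ⟨hG, hfl⟩ := splitA_spec s
  have hnd1 : ((List.range' 1 (s.length - 1)).filter
      (fun i => s.getD i ' ' != s.getD (i - 1) ' ')).Nodup := (List.nodup_range' 1 (by norm_num)).filter _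
  have hnd2 : (props 0 (splitA s)).Nodup :=
    ((props_sorted 0 (splitA s) (splitA_spec s).1.1).imp (fun h => Nat.ne_of_lt h))
  have hs1 : ((List.range' 1 (s.length - 1)).filter
      (fun i => s.getD i ' ' != s.getD (i - 1) ' ')).Sorted (· ≤ ·) :=
    List.Pairwise.filter _ ((List.pairwise_lt_range' 1 (by norm_num)).imp le_of_lt)
  have hs2 : (props 0 (splitA s)).Sorted (· ≤ ·) :=
    (props_sorted 0 (splitA s) (splitA_spec s).1.1).imp le_of_lt
  refine List.Perm.eq_of_pairwise (fun a b _ _ h1 h2 => Nat.le_antisymm h1 h2) hs1 hs2 ?_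
  · rw [List.perm_ext_iff_of_nodup hnd1 hnd2]
    · intro i
      rw [List.mem_filter, List.mem_range'_1]
      have hlen : 0 < s.length := List.length_pos_iff.mpr hne
      constructor
      · rintro ⟨⟨hge, hlt⟩, hp⟩
        have h2 : i < s.length := by omega
        have := (boundary_iff (splitA s) hG i hge (by rwa [hfl])).mp (by
          rw [hfl]; simpa using hp)
        exact this
      · intro hmem
        have hb := (props_gt 0 (splitA s) hG.1 i hmem)
        rw [hfl] at hb
        refine ⟨⟨by omega, by omega⟩, ?_⟩
        have := (boundary_iff (splitA s) hG i (by omega) (by rw [hfl]; omega)).mpr hmem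
        rw [hfl] at this
        simpa using this


theorem cutsOf_eq (s : List Char) (hne : s ≠ []) : cutsOf s = psum 0 (splitA s) := by
  have hG := splitA_spec s
  have hglne : splitA s ≠ [] := by
    intro h0
    have := hG.2
    rw [h0] at this
    exact hne this.symm
  rw [cutsOf, cuts_middle_eq s hne, psum_eq 0 (splitA s) hglne, hG.2]
  simp

-- ===== the memo invariant and correctness of canM =====
def MemoInv (m : PySem.Dict (List Char) Int) : Prop :=
  ∀ k v, m.get? k = some v → v = V k

theorem MemoInv_empty : MemoInv PySem.Dict.empty := by
  intro k v h
  simp [PySem.Dict.get?_empty] at h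

theorem MemoInv_insert (m : PySem.Dict (List Char) Int) (s : List Char) (hm : MemoInv m)
    (v : Int) (h : v = V s) : MemoInv (m.insert s v) := by
  intro k w hk
  rw [PySem.Dict.get?_insert] at hk
  split at hk
  · rename_i hks
    subst hks
    cases hk
    exact h
  · exact hm k w hk

-- one unfolding of V at a multi-group state
theorem V_step (s : List Char) (h2 : ¬ (splitA s).length = 1) :
    V s = if (List.range (splitA s).length).any
        (fun i => decide (((splitA s).getD i []).length > 1)
          && (V ((splitA s).eraseIdx i).flatten == 1)) then 1 else 0 := by
  have hfl : (splitA s).flatten = s := (splitA_spec s).2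
  rw [show V s = dfsAF (s.length + 1) [s] from rfl]
  simp only [dfsAF, List.flatten_cons, List.flatten_nil, List.append_nil]
  rw [if_neg (by simpa using h2)]
  have hany : (List.range (splitA s).length).any
        (fun i => decide (((splitA s).getD i []).length > 1)
          && (dfsAF s.length ((splitA s).eraseIdx i) == 1))
      = (List.range (splitA s).length).any
        (fun i => decide (((splitA s).getD i []).length > 1)
          && (V ((splitA s).eraseIdx i).flatten == 1)) := by
    apply list_any_congr
    intro i hi
    have hi' : i < (splitA s).length := by simpa using hi
    by_cases hg : ((splitA s).getD i []).length > 1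
    · have hlen := flatten_eraseIdx_length (splitA s) i hi'
      have hfl2 : (splitA s).flatten.length = s.length := by rw [hfl]
      have : dfsAF s.length ((splitA s).eraseIdx i) = V ((splitA s).eraseIdx i).flatten := by
        rw [dfsAF_congr_flatten s.length _ [((splitA s).eraseIdx i).flatten] (by simp)]
        exact dfsAF_eq_V _ _ (by omega)
      rw [this]
    · have hfalse : decide (((splitA s).getD i []).length > 1) = false := by simpa using hg
      rw [hfalse]
      simp
  rw [hany]

-- one unfolding of V at a single-group state
theorem V_single (s : List Char) (h1 : (splitA s).length = 1) :
    V s = if s.length = 1 then 0 else 1 := by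
  have hfl : (splitA s).flatten = s := (splitA_spec s).2
  obtain ⟨g, hg⟩ : ∃ g, splitA s = [g] := by
    cases h : splitA s with
    | nil => rw [h] at h1; simp at h1
    | cons a t =>
      cases t with
      | nil => exact ⟨a, rfl⟩
      | cons b t' => rw [h] at h1; simp at h1
  have hgs : g = s := by
    rw [hg] at hfl
    simpa using hfl
  rw [show V s = dfsAF (s.length + 1) [s] from rfl]
  simp only [dfsAF, List.flatten_cons, List.flatten_nil, List.append_nil]
  rw [hg, hgs]
  simp only [List.length_cons, List.length_nil, beq_self_eq_true, if_true, List.getD_cons_zero]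
  by_cases h : s.length = 1 <;> simp [h]

theorem canScan_spec (n : Nat)
    (IH : ∀ (s : List Char) (m : PySem.Dict (List Char) Int), s ≠ [] → s.length < n → MemoInv m →
      (canM n s m).1 = V s ∧ MemoInv (canM n s m).2)
    (s : List Char) (hne : s ≠ []) (hlen : s.length < n + 1)
    (hmany : ¬ (splitA s).length = 1) :
    ∀ (ks : List Nat) (m : PySem.Dict (List Char) Int), MemoInv m →
      (∀ k ∈ ks, k < (splitA s).length) →
      (canScan (canM n) s (cutsOf s) ks m).1
        = (if ks.any (fun k => decide (((splitA s).getD k []).length > 1)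
            && (V ((splitA s).eraseIdx k).flatten == 1)) then 1 else 0) ∧
      MemoInv (canScan (canM n) s (cutsOf s) ks m).2 := by
  have hG := splitA_spec s
  have hcuts := cutsOf_eq s hne
  intro ks
  induction ks with
  | nil => intro m hm _; exact ⟨by simp [canScan], by simpa [canScan] using hm⟩
  | cons k ks ih =>
    intro m hm hks
    have hk : k < (splitA s).length := hks k (by simp)
    have hdiff : (cutsOf s).getD (k + 1) 0 - (cutsOf s).getD k 0 = ((splitA s).getD k []).length := by
      rw [hcuts]
      exact psum_diff (splitA s) k hk 0
    by_cases hbig : ((splitA s).getD k []).length > 1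
    · -- the group is removable: recurse
      have hrem : s.take ((cutsOf s).getD k 0) ++ s.drop ((cutsOf s).getD (k + 1) 0)
          = ((splitA s).eraseIdx k).flatten := by
        have h := remove_eq (splitA s) k hk
        rw [hG.2] at h
        rw [hcuts]
        exact h
      have hlrem := flatten_eraseIdx_length (splitA s) k hk
      rw [hG.2] at hlrem
      have hnerem : ((splitA s).eraseIdx k).flatten ≠ [] := by
        apply flatten_ne_nil
        · intro g hg
          exact hG.1.1 g ((List.eraseIdx_sublist (splitA s) k).mem hg)
        · intro h0
          have := congrArg List.length h0
          simp [List.length_eraseIdx, hk] at this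
          omega
      have hrec := IH ((splitA s).eraseIdx k).flatten m hnerem (by omega) hm
      rw [show canScan (canM n) s (cutsOf s) (k :: ks) m
          = if (cutsOf s).getD (k + 1) 0 - (cutsOf s).getD k 0 > 1 then
              let r := canM n (s.take ((cutsOf s).getD k 0) ++ s.drop ((cutsOf s).getD (k + 1) 0)) m
              if r.1 == 1 then (1, r.2) else canScan (canM n) s (cutsOf s) ks r.2
            else canScan (canM n) s (cutsOf s) ks m from rfl]
      rw [if_pos (by omega), hrem]
      by_cases hv : V ((splitA s).eraseIdx k).flatten = 1
      · rw [if_pos (by simp [hrec.1, hv])]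
        refine ⟨?_, hrec.2⟩
        have hcond : ((k :: ks).any (fun k => decide (((splitA s).getD k []).length > 1)
            && (V ((splitA s).eraseIdx k).flatten == 1))) = true := by
          rw [List.any_cons]
          have : (decide (((splitA s).getD k []).length > 1)
              && (V ((splitA s).eraseIdx k).flatten == 1)) = true := by
            rw [decide_eq_true hbig, hv]
            rfl
          rw [this]
          rfl
        rw [hcond]
        rfl
      · rw [if_neg (by simp [hrec.1, hv])]
        have := ih (canM n ((splitA s).eraseIdx k).flatten m).2 hrec.2
          (fun k' hk' => hks k' (by simp [hk']))
        refine ⟨?_, this.2⟩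
        rw [this.1]
        have hfk : (decide (((splitA s).getD k []).length > 1)
            && (V ((splitA s).eraseIdx k).flatten == 1)) = false := by
          have : (V ((splitA s).eraseIdx k).flatten == 1) = false := by
            simpa [beq_eq_false_iff_ne] using hv
          rw [this, Bool.and_false]
        rw [List.any_cons, hfk, Bool.false_or]
    · -- group of length ≤ 1: skipped
      rw [show canScan (canM n) s (cutsOf s) (k :: ks) m
          = if (cutsOf s).getD (k + 1) 0 - (cutsOf s).getD k 0 > 1 then
              let r := canM n (s.take ((cutsOf s).getD k 0) ++ s.drop ((cutsOf s).getD (k + 1) 0)) m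
              if r.1 == 1 then (1, r.2) else canScan (canM n) s (cutsOf s) ks r.2
            else canScan (canM n) s (cutsOf s) ks m from rfl]
      rw [if_neg (by omega)]
      have := ih m hm (fun k' hk' => hks k' (by simp [hk']))
      refine ⟨?_, this.2⟩
      rw [this.1]
      have hfk : (decide (((splitA s).getD k []).length > 1)
          && (V ((splitA s).eraseIdx k).flatten == 1)) = false := by
        rw [decide_eq_false hbig, Bool.false_and]
      rw [List.any_cons, hfk, Bool.false_or]

theorem canM_spec : ∀ (n : Nat) (s : List Char) (m : PySem.Dict (List Char) Int),
    s ≠ [] → s.length < n → MemoInv m → (canM n s m).1 = V s ∧ MemoInv (canM n s m).2 := by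
  intro n
  induction n with
  | zero => intro s m hne hlen _; omega
  | succ n ih =>
    intro s m hne hlen hm
    have hG := splitA_spec s
    have hcuts := cutsOf_eq s hne
    have hglne : splitA s ≠ [] := by
      intro h0
      have := hG.2
      rw [h0] at this
      exact hne this.symm
    have hclen : (cutsOf s).length = (splitA s).length + 1 := by
      rw [hcuts, psum_length]
    cases hget : PySem.Dict.get? m s with
    | some v =>
      rw [show canM (n + 1) s m = (v, m) by simp [canM, hget]]
      exact ⟨hm s v hget, hm⟩
    | none =>
      by_cases h1 : (splitA s).length = 1
      · have hc2 : ((cutsOf s).length == 2) = true := by simp [hclen, h1]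
        have hres : canM (n + 1) s m
            = ((if s.length = 1 then (0:Int) else 1),
               m.insert s (if s.length = 1 then (0:Int) else 1)) := by
          simp only [canM, hget, hc2, if_true]
          by_cases h : s.length = 1 <;> simp [h]
        rw [hres]
        refine ⟨(V_single s h1).symm, ?_⟩
        exact MemoInv_insert m s hm _ (V_single s h1).symm
      · have hc2 : ((cutsOf s).length == 2) = false := by
          simp only [hclen, beq_eq_false_iff_ne]
          omega
        have hscan := canScan_spec n ih s hne hlen h1
          (List.range ((cutsOf s).length - 1)) m hm
          (by
            intro k hk
            rw [hclen] at hk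
            simpa using hk)
        have hrange : List.range ((cutsOf s).length - 1) = List.range ((splitA s).length) := by
          rw [hclen]; simp
        rw [hrange] at hscan
        have hres : canM (n + 1) s m
            = ((canScan (canM n) s (cutsOf s) (List.range ((cutsOf s).length - 1)) m).1,
               (canScan (canM n) s (cutsOf s) (List.range ((cutsOf s).length - 1)) m).2.insert s
                 (canScan (canM n) s (cutsOf s) (List.range ((cutsOf s).length - 1)) m).1) := by
          simp only [canM, hget, hc2]
          rfl
        rw [hres, hrange]
        have hval : (canScan (canM n) s (cutsOf s) (List.range (splitA s).length) m).1 = V s := by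
          rw [hscan.1, V_step s h1]
        exact ⟨hval, MemoInv_insert _ s hscan.2 _ hval⟩

-- ===== VERDICT (by name: the statement is the Claim_ definition above) =====
theorem dfs_spec : Claim_equal_dfs := by
  intro str _ hpre
  unfold Spec_dfs dfs dfs_alt
  have h : str.toList ≠ [] := fun h0 => hpre (String.toList_eq_nil_iff.mp h0)
  have := canM_spec (str.toList.length + 1) str.toList PySem.Dict.empty h (by omega) MemoInv_empty
  rw [this.1]
  rfl
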